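-- pv_equiv track=rewrite | github.com/fOstroski76/FER-labosi | AkGod2022-2023/UUUI/Lab2/solution2_clean.py | RedundancyCheck
-- ===== SOURCE A (Python) =====
-- def RedundancyCheck(resolvents,usableClauseDict) :
--
--     positiveEls = set()
--     negativeEls = set()
--     usableClauseDictCopy  = usableClauseDict.copy()
--
--     for el in resolvents :
--         if el.startswith("~") :
--             negativeEls.add(el[1:])
--
--         else :
--             positiveEls.add(el)
--
--     for el in resolvents :
--         if el in positiveEls and el in negativeEls :
--             return False
--
--     for el in usableClauseDictCopy.keys() :
--         if resolvents.issubset(usableClauseDictCopy[el]) :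
--             del(usableClauseDict[el])
--
--
--     return True
-- ===== SOURCE B (Python) =====
-- def RedundancyCheck(resolvents, usableClauseDict):
--     # sort-then-scan tautology test: key each literal as (core, sign) and sort;
--     # a literal together with its '~'-complement becomes an adjacent pair
--     # (core, 0), (core, 1) in the sorted key list
--     keyed = sorted((el[1:], 1) if el.startswith("~") else (el, 0) for el in resolvents)
--     for a, b in zip(keyed, keyed[1:]):
--         if a[0] == b[0] and a[1] != b[1]:
--             return False
--     # delete (in place) every key whose clause is a superset of resolvents
--     for key in list(usableClauseDict):
--         if resolvents.issubset(usableClauseDict[key]):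
--             del usableClauseDict[key]
--     return True
-- ===== Notes on version B (the rewrite author's own statement) =====
-- stated objective: alternative
-- what changed: Replaces A's two-pass positive/negative set construction plus membership pass by a sort-then-scan: each literal is keyed as a (core, sign) pair, the keys are sorted, and a complementary pair shows up as an adjacent (core,0),(core,1) pair in one linear scan; the subsumption loop iterates the dict's key list directly instead of indexing a dict copy.
import Mathlib
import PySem

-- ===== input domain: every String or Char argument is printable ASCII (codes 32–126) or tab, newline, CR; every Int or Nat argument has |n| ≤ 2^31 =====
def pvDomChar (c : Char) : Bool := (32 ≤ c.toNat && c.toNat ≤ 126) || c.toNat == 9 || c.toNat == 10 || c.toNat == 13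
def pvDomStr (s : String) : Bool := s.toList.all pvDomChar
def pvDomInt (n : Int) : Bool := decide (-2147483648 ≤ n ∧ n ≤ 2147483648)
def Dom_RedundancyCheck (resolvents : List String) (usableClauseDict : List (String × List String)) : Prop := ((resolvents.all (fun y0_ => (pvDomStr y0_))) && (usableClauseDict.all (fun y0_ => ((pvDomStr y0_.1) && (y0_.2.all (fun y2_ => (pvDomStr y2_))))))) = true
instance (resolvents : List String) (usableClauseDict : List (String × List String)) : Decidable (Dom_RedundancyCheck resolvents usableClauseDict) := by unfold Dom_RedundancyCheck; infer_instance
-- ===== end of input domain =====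

-- B replaces A's two-set construction and membership pass by sort-then-scan: literals are
-- keyed as (core, sign) pairs, sorted, and a complementary pair is found as an adjacent
-- (core,0),(core,1) pair in one linear scan (alternative algorithm). The subsumption loop
-- of both Pythons only MUTATES the usableClauseDict argument in place; the equivalence
-- proved here is about the RETURN value — in the ports that loop is kept as a
-- value-discarding computation.

-- ===== PORT A =====
def RedundancyCheck (resolvents : List String) (usableClauseDict : List (String × List String)) : Bool :=
  let usableClauseDictCopy : PySem.Dict String (List String) := PySem.Dict.ofList usableClauseDict
  let pn : PySem.Set String × PySem.Set String :=
    resolvents.foldl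
      (fun pn el =>
        if PySem.Str.startswith el "~" then
          (pn.1, PySem.Set.add pn.2 (PySem.Str.slice el (some 1) none))
        else
          (PySem.Set.add pn.1 el, pn.2))
      (PySem.Set.empty, PySem.Set.empty)
  if resolvents.any (fun el => PySem.Set.contains pn.1 el && PySem.Set.contains pn.2 el) then
    false
  else
    -- 'for el in copy.keys(): if resolvents.issubset(copy[el]): del usableClauseDict[el]'
    -- (copy[el] never raises: el ranges over copy's keys, so getD's default is never used;
    --  the loop's dict is discarded, as the Python's mutation is invisible in the return value)
    let _ := usableClauseDictCopy.keys.foldl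
      (fun (d : PySem.Dict String (List String)) el =>
        if PySem.Set.issubset resolvents (usableClauseDictCopy.getD el []) then d.erase el else d)
      (PySem.Dict.ofList usableClauseDict)
    true

-- ===== PORT B =====
-- '(el[1:], 1) if el.startswith("~") else (el, 0)'
def keyOf (el : String) : String × Nat :=
  if PySem.Str.startswith el "~" then (PySem.Str.slice el (some 1) none, 1) else (el, 0)

-- 'for a, b in zip(keyed, keyed[1:]): if a[0] == b[0] and a[1] != b[1]: return False'
def adjScan : List (String × Nat) → Bool
  | [] => false
  | [_] => false
  | a :: b :: t => if a.1 == b.1 && a.2 != b.2 then true else adjScan (b :: t)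

def RedundancyCheck_alt (resolvents : List String) (usableClauseDict : List (String × List String)) : Bool :=
  let keyed := PySem.List.sorted2 (resolvents.map keyOf) Prod.fst Prod.snd
  if adjScan keyed then
    false
  else
    -- 'for key in list(d): if resolvents.issubset(d[key]): del d[key]'
    -- (d[key] never raises: key ranges over d's own keys and only visited keys are
    --  deleted, so getD's default is unused; the loop's dict is discarded, as the
    --  Python's mutation is invisible in the return value)
    let _ := (PySem.Dict.ofList usableClauseDict).keys.foldl
      (fun (d : PySem.Dict String (List String)) k =>
        if PySem.Set.issubset resolvents (d.getD k []) then d.erase k else d)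
      (PySem.Dict.ofList usableClauseDict)
    true

-- ===== PRECONDITION & SPEC =====
def Spec_RedundancyCheck (resolvents : List String) (usableClauseDict : List (String × List String)) (out : Bool) : Prop := out = RedundancyCheck_alt resolvents usableClauseDict
instance (resolvents : List String) (usableClauseDict : List (String × List String)) (out : Bool) : Decidable (Spec_RedundancyCheck resolvents usableClauseDict out) := by unfold Spec_RedundancyCheck; infer_instance

-- ===== CLAIM (what is proved, stated in full; the proofs are below) =====
def Claim_equal_RedundancyCheck : Prop := ∀ (resolvents : List String) (usableClauseDict : List (String × List String)), Dom_RedundancyCheck resolvents usableClauseDict → Spec_RedundancyCheck resolvents usableClauseDict (RedundancyCheck resolvents usableClauseDict)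

-- ===== LEMMAS AND PROOFS =====

-- A string starts with "~" and has x as its tail exactly when it is "~" + x.
lemma tilde_iff (y x : String) :
    (PySem.Str.startswith y "~" = true ∧ PySem.Str.slice y (some 1) none = x)
    ↔ y = String.ofList ('~' :: x.toList) := by
  have hslice : (PySem.Str.slice y (some 1) none).toList = y.toList.tail := by
    simp [PySem.Str.toList_slice, PySem.Chars.slice_eq_listSlice, PySem.List.slice_from_one]
  constructor
  · rintro ⟨h1, h2⟩
    rw [PySem.Str.startswith_eq, PySem.Chars.startswith_iff] at h1
    obtain ⟨t, ht⟩ := h1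
    apply String.toList_inj.mp
    have hx : y.toList.tail = x.toList := by rw [← h2, hslice]
    simp only [String.toList_ofList]
    rw [← ht] at hx ⊢
    simp at hx
    simp [hx]
  · rintro rfl
    constructor
    · rw [PySem.Str.startswith_eq, PySem.Chars.startswith_iff]
      simp [String.toList_ofList]
    · apply String.toList_inj.mp
      rw [hslice]
      simp [String.toList_ofList]

-- membership in the first (positive-literals) component of A's build fold
lemma mem_fold_fst (l : List String) (pn : PySem.Set String × PySem.Set String) (x : String) :
    x ∈ (l.foldl
      (fun pn el =>
        if PySem.Str.startswith el "~" then
          (pn.1, PySem.Set.add pn.2 (PySem.Str.slice el (some 1) none))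
        else
          (PySem.Set.add pn.1 el, pn.2)) pn).1
    ↔ x ∈ pn.1 ∨ (x ∈ l ∧ PySem.Str.startswith x "~" = false) := by
  induction l generalizing pn with
  | nil => simp
  | cons a l ih =>
    simp only [List.foldl_cons]
    by_cases h : PySem.Str.startswith a "~" = true
    · rw [if_pos h, ih]
      constructor
      · rintro (hp | ⟨hl, hx⟩)
        · exact Or.inl hp
        · exact Or.inr ⟨List.mem_cons_of_mem _ hl, hx⟩
      · rintro (hp | ⟨hl, hx⟩)
        · exact Or.inl hp
        · rcases List.mem_cons.mp hl with rfl | hl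
          · rw [hx] at h; exact absurd h (by decide)
          · exact Or.inr ⟨hl, hx⟩
    · rw [if_neg h, ih]
      simp only [PySem.Set.mem_add]
      have h' : PySem.Str.startswith a "~" = false := by
        cases hh : PySem.Str.startswith a "~" <;> simp_all
      constructor
      · rintro ((hp | rfl) | ⟨hl, hx⟩)
        · exact Or.inl hp
        · exact Or.inr ⟨List.mem_cons_self, h'⟩
        · exact Or.inr ⟨List.mem_cons_of_mem _ hl, hx⟩
      · rintro (hp | ⟨hl, hx⟩)
        · exact Or.inl (Or.inl hp)
        · rcases List.mem_cons.mp hl with rfl | hl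
          · exact Or.inl (Or.inr rfl)
          · exact Or.inr ⟨hl, hx⟩

-- membership in the second (negated-literals) component of A's build fold
lemma mem_fold_snd (l : List String) (pn : PySem.Set String × PySem.Set String) (x : String) :
    x ∈ (l.foldl
      (fun pn el =>
        if PySem.Str.startswith el "~" then
          (pn.1, PySem.Set.add pn.2 (PySem.Str.slice el (some 1) none))
        else
          (PySem.Set.add pn.1 el, pn.2)) pn).2
    ↔ x ∈ pn.2 ∨ ∃ y ∈ l, PySem.Str.startswith y "~" = true ∧ PySem.Str.slice y (some 1) none = x := by
  induction l generalizing pn with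
  | nil => simp
  | cons a l ih =>
    simp only [List.foldl_cons]
    by_cases h : PySem.Str.startswith a "~" = true
    · rw [if_pos h, ih]
      simp only [PySem.Set.mem_add]
      constructor
      · rintro ((hp | rfl) | ⟨y, hy, hsw, hsl⟩)
        · exact Or.inl hp
        · exact Or.inr ⟨a, List.mem_cons_self, h, rfl⟩
        · exact Or.inr ⟨y, List.mem_cons_of_mem _ hy, hsw, hsl⟩
      · rintro (hp | ⟨y, hy, hsw, hsl⟩)
        · exact Or.inl (Or.inl hp)
        · rcases List.mem_cons.mp hy with rfl | hy
          · exact Or.inl (Or.inr hsl.symm)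
          · exact Or.inr ⟨y, hy, hsw, hsl⟩
    · rw [if_neg h, ih]
      constructor
      · rintro (hp | ⟨y, hy, hsw, hsl⟩)
        · exact Or.inl hp
        · exact Or.inr ⟨y, List.mem_cons_of_mem _ hy, hsw, hsl⟩
      · rintro (hp | ⟨y, hy, hsw, hsl⟩)
        · exact Or.inl hp
        · rcases List.mem_cons.mp hy with rfl | hy
          · exact absurd hsw h
          · exact Or.inr ⟨y, hy, hsw, hsl⟩

-- A's early-return test is exactly "some positive literal has its complement present"
lemma a_taut_iff (r : List String) :
    (r.any (fun el =>
      PySem.Set.contains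
        (r.foldl
          (fun pn el =>
            if PySem.Str.startswith el "~" then
              (pn.1, PySem.Set.add pn.2 (PySem.Str.slice el (some 1) none))
            else
              (PySem.Set.add pn.1 el, pn.2)) (PySem.Set.empty, PySem.Set.empty)).1 el
      && PySem.Set.contains
        (r.foldl
          (fun pn el =>
            if PySem.Str.startswith el "~" then
              (pn.1, PySem.Set.add pn.2 (PySem.Str.slice el (some 1) none))
            else
              (PySem.Set.add pn.1 el, pn.2)) (PySem.Set.empty, PySem.Set.empty)).2 el)) = true
    ↔ ∃ el ∈ r, PySem.Str.startswith el "~" = false ∧ String.ofList ('~' :: el.toList) ∈ r := by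
  simp only [List.any_eq_true, Bool.and_eq_true, PySem.Set.contains_iff]
  constructor
  · rintro ⟨el, hel, hpos, hneg⟩
    rw [mem_fold_fst] at hpos
    rw [mem_fold_snd] at hneg
    rcases hpos with hp | ⟨_, hsw⟩
    · exact absurd hp (by simp [PySem.Set.empty])
    rcases hneg with hn | ⟨y, hy, hysw, hysl⟩
    · exact absurd hn (by simp [PySem.Set.empty])
    refine ⟨el, hel, hsw, ?_⟩
    rw [← (tilde_iff y el).mp ⟨hysw, hysl⟩]
    exact hy
  · rintro ⟨el, hel, hsw, hmem⟩
    refine ⟨el, hel, ?_, ?_⟩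
    · rw [mem_fold_fst]; exact Or.inr ⟨hel, hsw⟩
    · rw [mem_fold_snd]
      exact Or.inr ⟨String.ofList ('~' :: el.toList), hmem,
        ((tilde_iff _ el).mpr rfl).1, ((tilde_iff _ el).mpr rfl).2⟩

-- the strict lexicographic comparison used by sorted2 on (core, sign) keys
def lexLt (a b : String × Nat) : Bool :=
  decide (a.1 < b.1) || (!decide (b.1 < a.1) && decide (a.2 < b.2))

lemma lexLt_iff (a b : String × Nat) :
    lexLt a b = true ↔ (a.1 < b.1 ∨ (a.1 = b.1 ∧ a.2 < b.2)) := by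
  simp only [lexLt, Bool.or_eq_true, Bool.and_eq_true, Bool.not_eq_eq_eq_not, Bool.not_true,
    decide_eq_true_eq, decide_eq_false_iff_not, not_lt]
  constructor
  · rintro (h | ⟨h1, h2⟩)
    · exact Or.inl h
    · rcases lt_or_eq_of_le h1 with h | h
      · exact Or.inl h
      · exact Or.inr ⟨h, h2⟩
  · rintro (h | ⟨h1, h2⟩)
    · exact Or.inl h
    · exact Or.inr ⟨le_of_eq h1, h2⟩

lemma lexLt_false_iff (a b : String × Nat) :
    lexLt a b = false ↔ ¬ (a.1 < b.1 ∨ (a.1 = b.1 ∧ a.2 < b.2)) := by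
  rw [← lexLt_iff]
  cases h : lexLt a b <;> simp

lemma lexLt_irrefl (a : String × Nat) : lexLt a a = false := by
  rw [lexLt_false_iff]; rintro (h | ⟨_, h⟩) <;> exact absurd h (by simp)

lemma lexLt_asymm {a b : String × Nat} (h : lexLt a b = true) : lexLt b a = false := by
  rw [lexLt_iff] at h; rw [lexLt_false_iff]
  rcases h with h | ⟨h1, h2⟩
  · rintro (h' | ⟨h1', _⟩)
    · exact absurd h (lt_asymm h')
    · exact absurd h (by rw [h1']; simp)
  · rintro (h' | ⟨_, h2'⟩)
    · exact absurd h' (by rw [h1]; simp)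
    · omega

-- x < y and ¬(z < y) give ¬(z < x)   (z is at least y, which is above x)
lemma lexLt_shift {x y z : String × Nat} (h1 : lexLt x y = true) (h2 : lexLt z y = false) :
    lexLt z x = false := by
  rw [lexLt_iff] at h1; rw [lexLt_false_iff] at h2 ⊢
  push Not at h2 ⊢
  rcases h1 with h | ⟨he, hn⟩
  · constructor
    · intro hzx; exact absurd (lt_trans hzx h) (h2.1)
    · intro hze; exfalso; exact h2.1 (hze ▸ h)
  · constructor
    · intro hzx; exact absurd (he ▸ hzx) h2.1
    · intro hze; have := h2.2 (hze.trans he); omega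

-- x < y and ¬(x < b) give b < y   (b is at most x, which is below y)
lemma lexLt_shift' {x y b : String × Nat} (h1 : lexLt x y = true) (h2 : lexLt x b = false) :
    lexLt b y = true := by
  rw [lexLt_iff] at h1 ⊢; rw [lexLt_false_iff] at h2
  push Not at h2
  rcases h1 with h | ⟨he, hn⟩
  · rcases lt_trichotomy b.1 x.1 with hb | hb | hb
    · exact Or.inl (lt_trans hb h)
    · exact Or.inl (hb ▸ h)
    · exact absurd hb h2.1
  · rcases lt_trichotomy b.1 x.1 with hb | hb | hb
    · exact Or.inl (he ▸ hb)
    · have := h2.2 hb.symm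
      exact Or.inr ⟨hb.trans he, by omega⟩
    · exact absurd hb h2.1

-- ¬(b < a) and ¬(c < b) give ¬(c < a)   (transitivity of the complement order)
lemma lexLt_false_trans {a b c : String × Nat} (h1 : lexLt b a = false)
    (h2 : lexLt c b = false) : lexLt c a = false := by
  rw [lexLt_false_iff] at h1 h2 ⊢
  push Not at h1 h2 ⊢
  constructor
  · intro hca
    rcases lt_trichotomy c.1 b.1 with h | h | h
    · exact h2.1 h
    · exact h1.1 (h ▸ hca)
    · exact h1.1 (lt_trans h hca)
  · intro hce
    rcases lt_trichotomy c.1 b.1 with h | h | h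
    · exact absurd h h2.1
    · have hba : b.1 = a.1 := h ▸ hce
      have := h1.2 hba; have := h2.2 h; omega
    · exact absurd (hce ▸ h) h1.1

-- inserting into a list sorted by the complement order keeps it sorted
lemma pairwise_insertBy (x : String × Nat) (ys : List (String × Nat))
    (h : ys.Pairwise (fun a b => lexLt b a = false)) :
    (PySem.List.insertBy lexLt x ys).Pairwise (fun a b => lexLt b a = false) := by
  induction ys with
  | nil => simp [PySem.List.insertBy]
  | cons y ys ih =>
    rw [List.pairwise_cons] at h
    show (if lexLt x y = true then x :: y :: ys else y :: PySem.List.insertBy lexLt x ys).Pairwise _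
    split_ifs with hxy
    · refine List.Pairwise.cons ?_ (List.Pairwise.cons h.1 h.2)
      intro z hz
      rcases List.mem_cons.mp hz with rfl | hz
      · exact lexLt_asymm hxy
      · exact lexLt_shift hxy (h.1 z hz)
    · refine List.Pairwise.cons ?_ (ih h.2)
      intro z hz
      rcases (PySem.List.mem_insertBy _ _ _ _).mp hz with rfl | hz
      · exact Bool.eq_false_iff.mpr hxy
      · exact h.1 z hz

lemma pairwise_foldl_insertBy (xs : List (String × Nat)) :
    ∀ acc : List (String × Nat), acc.Pairwise (fun a b => lexLt b a = false) →
    (xs.foldl (fun acc x => PySem.List.insertBy lexLt x acc) acc).Pairwise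
      (fun a b => lexLt b a = false) := by
  induction xs with
  | nil => intro acc h; simpa using h
  | cons x xs ih =>
    intro acc h
    exact ih _ (pairwise_insertBy x acc h)

lemma sorted2_eq (xs : List (String × Nat)) :
    PySem.List.sorted2 xs Prod.fst Prod.snd
      = xs.foldl (fun acc x => PySem.List.insertBy lexLt x acc) [] := rfl

lemma sorted2_pairwise_lex (xs : List (String × Nat)) :
    (PySem.List.sorted2 xs Prod.fst Prod.snd).Pairwise (fun a b => lexLt b a = false) := by
  rw [sorted2_eq]
  exact pairwise_foldl_insertBy xs [] (by simp)

-- in a list sorted by the complement order, two elements with x strictly below y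
-- are separated by a strictly increasing ADJACENT pair lying between them
lemma chain_pair (y : String × Nat) (l : List (String × Nat)) :
    l.Pairwise (fun a b => lexLt b a = false) →
    ∀ x, x ∈ l → y ∈ l → lexLt x y = true →
    ∃ p ∈ l.zip l.tail, lexLt p.1 p.2 = true ∧ lexLt p.1 x = false ∧ lexLt y p.2 = false := by
  induction l with
  | nil => intro _ x hx; cases hx
  | cons a rest ih =>
    intro hpw x hx hy hxy
    rw [List.pairwise_cons] at hpw
    have hyrest : y ∈ rest := by
      rcases List.mem_cons.mp hy with rfl | h
      · exfalso
        rcases List.mem_cons.mp hx with rfl | hxr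
        · rw [lexLt_irrefl] at hxy; exact Bool.false_ne_true hxy
        · rw [hpw.1 x hxr] at hxy; exact Bool.false_ne_true hxy
      · exact h
    rcases List.mem_cons.mp hx with rfl | hxr
    · -- x is the head a
      cases rest with
      | nil => cases hyrest
      | cons b rest' =>
        by_cases hab : lexLt x b = true
        · refine ⟨(x, b), List.mem_cons_self, hab, lexLt_irrefl x, ?_⟩
          rcases List.mem_cons.mp hyrest with rfl | hyr
          · exact lexLt_irrefl y
          · rcases (List.pairwise_cons.mp hpw.2) with ⟨hb, _⟩
            exact hb y hyr
        · have hab' : lexLt x b = false := Bool.eq_false_iff.mpr hab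
          have hby : lexLt b y = true := lexLt_shift' hxy hab'
          obtain ⟨p, hp, h1, h2, h3⟩ :=
            ih hpw.2 b List.mem_cons_self hyrest hby
          exact ⟨p, List.mem_cons_of_mem _ hp, h1,
            lexLt_false_trans (hpw.1 b List.mem_cons_self) h2, h3⟩
    · -- x is in the tail; recurse
      obtain ⟨p, hp, h1, h2, h3⟩ := ih hpw.2 x hxr hyrest hxy
      cases rest with
      | nil => cases hxr
      | cons b rest' =>
        exact ⟨p, List.mem_cons_of_mem _ hp, h1, h2, h3⟩

lemma adjScan_iff (l : List (String × Nat)) :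
    adjScan l = true ↔ ∃ p ∈ l.zip l.tail, p.1.1 = p.2.1 ∧ p.1.2 ≠ p.2.2 := by
  induction l with
  | nil => simp [adjScan]
  | cons a rest ih =>
    cases rest with
    | nil => simp [adjScan]
    | cons b t =>
      show (if a.1 == b.1 && a.2 != b.2 then true else adjScan (b :: t)) = true ↔ _
      have hzip : (a :: b :: t).zip (a :: b :: t).tail = (a, b) :: (b :: t).zip t := rfl
      rw [hzip]
      split_ifs with hc
      · simp only [true_iff]
        refine ⟨(a, b), List.mem_cons_self, ?_⟩
        rcases Bool.and_eq_true_iff.mp hc with ⟨h1, h2⟩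
        exact ⟨by simpa using h1, by simpa using h2⟩
      · rw [ih]
        constructor
        · rintro ⟨p, hp, h⟩
          exact ⟨p, List.mem_cons_of_mem _ hp, h⟩
        · rintro ⟨p, hp, h⟩
          rcases List.mem_cons.mp hp with rfl | hp
          · exfalso
            apply hc
            simp only [Bool.and_eq_true, beq_iff_eq, bne_iff_ne]
            exact ⟨h.1, h.2⟩
          · exact ⟨p, hp, h⟩

-- membership in the keyed list
lemma key0_mem (r : List String) (c : String) :
    (c, 0) ∈ r.map keyOf ↔ c ∈ r ∧ PySem.Str.startswith c "~" = false := by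
  simp only [List.mem_map, keyOf]
  constructor
  · rintro ⟨el, hel, hk⟩
    by_cases h : PySem.Str.startswith el "~" = true
    · rw [if_pos h] at hk; exact absurd (congrArg Prod.snd hk) (by simp)
    · rw [if_neg h] at hk
      have : el = c := congrArg Prod.fst hk
      subst this
      exact ⟨hel, by cases hh : PySem.Str.startswith el "~" <;> simp_all⟩
  · rintro ⟨hc, hsw⟩
    exact ⟨c, hc, by rw [if_neg (by simp only [hsw]; simp)]⟩

lemma key1_mem (r : List String) (c : String) :
    (c, 1) ∈ r.map keyOf ↔ String.ofList ('~' :: c.toList) ∈ r := by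
  simp only [List.mem_map, keyOf]
  constructor
  · rintro ⟨el, hel, hk⟩
    by_cases h : PySem.Str.startswith el "~" = true
    · rw [if_pos h] at hk
      have hsl : PySem.Str.slice el (some 1) none = c := congrArg Prod.fst hk
      rw [← (tilde_iff el c).mp ⟨h, hsl⟩]
      exact hel
    · rw [if_neg h] at hk; exact absurd (congrArg Prod.snd hk) (by simp)
  · intro hmem
    refine ⟨String.ofList ('~' :: c.toList), hmem, ?_⟩
    have hprops := (tilde_iff (String.ofList ('~' :: c.toList)) c).mpr rfl
    rw [if_pos hprops.1, hprops.2]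

lemma keyed_snd (r : List String) (p : String × Nat) (hp : p ∈ r.map keyOf) :
    p.2 = 0 ∨ p.2 = 1 := by
  rcases List.mem_map.mp hp with ⟨el, _, hk⟩
  rw [← hk]; unfold keyOf; split_ifs <;> simp

-- B's sort-then-scan test finds exactly "some positive literal has its complement present"
lemma b_taut_iff (r : List String) :
    adjScan (PySem.List.sorted2 (r.map keyOf) Prod.fst Prod.snd) = true
    ↔ ∃ el ∈ r, PySem.Str.startswith el "~" = false ∧ String.ofList ('~' :: el.toList) ∈ r := by
  have hperm := PySem.List.sorted2_perm (r.map keyOf) Prod.fst Prod.snd false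
  have hmem : ∀ p, p ∈ PySem.List.sorted2 (r.map keyOf) Prod.fst Prod.snd ↔ p ∈ r.map keyOf :=
    fun p => hperm.mem_iff
  rw [adjScan_iff]
  constructor
  · rintro ⟨p, hp, hfst, hsnd⟩
    have h1 : p.1 ∈ r.map keyOf := (hmem _).mp (List.of_mem_zip hp).1
    have h2 : p.2 ∈ r.map keyOf :=
      (hmem _).mp (List.mem_of_mem_tail (List.of_mem_zip hp).2)
    have hc : p.1.1 = p.2.1 := hfst
    have hkeys : (p.1.1, 0) ∈ r.map keyOf ∧ (p.1.1, 1) ∈ r.map keyOf := by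
      rcases keyed_snd r p.1 h1 with ha | ha <;> rcases keyed_snd r p.2 h2 with hb | hb
      · omega
      · constructor
        · rw [← ha]; simpa using h1
        · rw [hc, ← hb]; simpa using h2
      · constructor
        · rw [hc, ← hb]; simpa using h2
        · rw [← ha]; simpa using h1
      · omega
    obtain ⟨hsw0, hsw1⟩ := hkeys
    rw [key0_mem] at hsw0
    rw [key1_mem] at hsw1
    exact ⟨p.1.1, hsw0.1, hsw0.2, hsw1⟩
  · rintro ⟨el, hel, hsw, hcm⟩
    have h0 : (el, 0) ∈ PySem.List.sorted2 (r.map keyOf) Prod.fst Prod.snd :=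
      (hmem _).mpr ((key0_mem r el).mpr ⟨hel, hsw⟩)
    have h1 : (el, 1) ∈ PySem.List.sorted2 (r.map keyOf) Prod.fst Prod.snd :=
      (hmem _).mpr ((key1_mem r el).mpr hcm)
    have hlt : lexLt (el, 0) (el, 1) = true := by
      rw [lexLt_iff]; exact Or.inr ⟨rfl, by omega⟩
    obtain ⟨p, hp, hpp, hlo, hhi⟩ :=
      chain_pair (el, 1) _ (sorted2_pairwise_lex (r.map keyOf)) (el, 0) h0 h1 hlt
    refine ⟨p, hp, ?_, ?_⟩
    · -- bounds force the adjacent pair to share its core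
      rw [lexLt_iff] at hpp
      rw [lexLt_false_iff] at hlo hhi
      push Not at hlo hhi
      rcases hpp with h | ⟨he, _⟩
      · exfalso
        have hele : el ≤ p.1.1 := le_of_not_gt hlo.1
        have hle : p.2.1 ≤ el := le_of_not_gt hhi.1
        exact absurd (lt_of_lt_of_le h hle) (not_lt_of_ge hele)
      · exact he
    · rw [lexLt_iff] at hpp
      rcases hpp with h | ⟨_, hn⟩
      · exfalso
        have hele : el ≤ p.1.1 := le_of_not_gt (by rw [lexLt_false_iff] at hlo; push Not at hlo; exact hlo.1)
        have hle : p.2.1 ≤ el := le_of_not_gt (by rw [lexLt_false_iff] at hhi; push Not at hhi; exact hhi.1)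
        exact absurd (lt_of_lt_of_le h hle) (not_lt_of_ge hele)
      · omega

-- the two tautology tests compute the same boolean
lemma taut_eq (r : List String) :
    (r.any (fun el =>
      PySem.Set.contains
        (r.foldl
          (fun pn el =>
            if PySem.Str.startswith el "~" then
              (pn.1, PySem.Set.add pn.2 (PySem.Str.slice el (some 1) none))
            else
              (PySem.Set.add pn.1 el, pn.2)) (PySem.Set.empty, PySem.Set.empty)).1 el
      && PySem.Set.contains
        (r.foldl
          (fun pn el =>
            if PySem.Str.startswith el "~" then
              (pn.1, PySem.Set.add pn.2 (PySem.Str.slice el (some 1) none))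
            else
              (PySem.Set.add pn.1 el, pn.2)) (PySem.Set.empty, PySem.Set.empty)).2 el))
    = adjScan (PySem.List.sorted2 (r.map keyOf) Prod.fst Prod.snd) := by
  rw [Bool.eq_iff_iff, a_taut_iff, b_taut_iff]

-- ===== VERDICT (by name: the statement is the Claim_ definition above) =====
theorem RedundancyCheck_spec : Claim_equal_RedundancyCheck := by
  intro r d _
  unfold Spec_RedundancyCheck RedundancyCheck RedundancyCheck_alt
  simp only []
  rw [taut_eq r]
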